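-- pv_equiv track=rewrite | github.com/niranjan-nagaraju/Development | python/hackerrank/challenges/climbing_the_leaderboard/climbing_the_leaderboard2.py | calculate_initial_ranking
-- ===== SOURCE A (Python) =====
-- def calculate_initial_ranking(scores, alice_game_score):
-- 	current_rank = 1
-- 	current_score = scores[0]
-- 	i = 0
-- 	while i < len(scores):
-- 		try:
-- 			# if current score == alice's score,
-- 			#    then her rank would the same as the rank for curernt score
-- 			# if current score < alice's score,
-- 			#    then her rank would supplant the old rank for current score
-- 			# In either case, we just return the max current rank counted so far and return
-- 			if current_score <= alice_game_score:
-- 				break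
--
-- 			# skip repetitions
-- 			while scores[i] == current_score:
-- 				i += 1
--
-- 			# We just hit a different score than the previous one in the sequence
-- 			# Mark this as current score, Increase ranking
-- 			# to be updated by the inner loop until scores[i] match current score
-- 			current_score = scores[i]
-- 			current_rank += 1
-- 		except IndexError:
-- 			# ran out of scores to match
-- 			# This means alice_aame_score is at the bottom of the table,
-- 			# and is a new low, Add +1 to the lowest ranking right now
-- 			current_rank += 1
-- 			break
--
-- 	return (current_rank, i-1)
-- ===== SOURCE B (Python) =====
-- def calculate_initial_ranking(scores, alice_game_score):
--     # Two-stage: extract the prefix of scores strictly above alice's score,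
--     # then count its runs of equal values (dense rank counting).
--     # On empty scores it returns (1, -1) instead of raising IndexError.
--     prefix = []
--     for s in scores:
--         if s <= alice_game_score:
--             break
--         prefix.append(s)
--     runs = 0
--     prev = None
--     for s in prefix:
--         if prev is None or s != prev:
--             runs += 1
--         prev = s
--     return (runs + 1, len(prefix) - 1)
-- ===== Notes on version B (the rewrite author's own statement) =====
-- stated objective: simpler
-- what changed: Replaces A's single interleaved while-loop with try/except IndexError and an inner skip-repeats loop by a two-stage pipeline: extract the prefix of scores strictly above alice's score, then count its runs of adjacent equal values in one scan.
import Mathlib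
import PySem

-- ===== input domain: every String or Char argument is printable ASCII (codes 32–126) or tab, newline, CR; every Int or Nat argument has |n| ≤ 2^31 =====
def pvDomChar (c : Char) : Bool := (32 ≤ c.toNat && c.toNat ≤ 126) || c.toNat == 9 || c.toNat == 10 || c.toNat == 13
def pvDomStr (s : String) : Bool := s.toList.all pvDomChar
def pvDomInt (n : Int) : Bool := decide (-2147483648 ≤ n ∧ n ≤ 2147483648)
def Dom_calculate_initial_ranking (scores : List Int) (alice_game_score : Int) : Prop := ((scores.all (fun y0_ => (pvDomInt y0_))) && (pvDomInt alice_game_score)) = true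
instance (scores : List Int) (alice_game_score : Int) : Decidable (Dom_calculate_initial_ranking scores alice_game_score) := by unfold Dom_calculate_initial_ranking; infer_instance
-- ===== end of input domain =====

-- B replaces A's interleaved while/try-except scan by a two-stage pipeline (extract the >alice prefix, then count its runs of adjacent equal values); same O(n) cost, simpler control flow.


-- ===== PORT A =====
-- A: interleaved while loop; `skipA` is the inner `while scores[i] == current_score: i += 1`
-- (returns the index where it stops; Python raises IndexError exactly when that index = len).
def skipA (scores : List Int) (cs : Int) (i : Nat) : Nat :=
  if h : i < scores.length then
    if scores[i] = cs then skipA scores cs (i + 1) else i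
  else i
termination_by scores.length - i

-- the outer `while i < len(scores)` loop; fuel only makes the recursion total,
-- it is never exhausted on the runs the theorem is about (fuel > len - i).
def loopA (scores : List Int) (alice : Int) (rank cs : Int) (i : Nat) : Nat → Int × Int
  | 0 => (rank, (i : Int) - 1)
  | fuel + 1 =>
    if i < scores.length then
      if cs ≤ alice then (rank, (i : Int) - 1)
      else
        if h : skipA scores cs i < scores.length then
          loopA scores alice (rank + 1) scores[skipA scores cs i] (skipA scores cs i) fuel
        else (rank + 1, (skipA scores cs i : Int) - 1)   -- IndexError in the inner loop: rank += 1; break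
    else (rank, (i : Int) - 1)

def calculate_initial_ranking (scores : List Int) (alice_game_score : Int) : Int × Int :=
  match scores with
  | [] => (0, 0)          -- unreachable: Python raises IndexError on scores[0]; outside Pre_
  | s0 :: _ => loopA scores alice_game_score 1 s0 0 (scores.length + 1)

-- ===== PORT B =====
-- B: the first for-loop of Source B (append until s <= alice, then break)
def prefixGT (alice : Int) : List Int → List Int
  | [] => []
  | s :: rest => if s ≤ alice then [] else s :: prefixGT alice rest

-- B: the second for-loop of Source B (state: runs so far, previous element)
def calculate_initial_ranking_alt (scores : List Int) (alice_game_score : Int) : Int × Int :=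
  let pfx := prefixGT alice_game_score scores
  let st := pfx.foldl
    (fun (st : Int × Option Int) s =>
      (if st.2 = none ∨ st.2 ≠ some s then st.1 + 1 else st.1, some s)) (0, none)
  (st.1 + 1, (pfx.length : Int) - 1)

-- ===== PRECONDITION & SPEC =====
-- Pre_ excludes only the empty list, on which Python A raises IndexError (scores[0]).
def Pre_calculate_initial_ranking (scores : List Int) (alice_game_score : Int) : Prop := scores ≠ []
instance (scores : List Int) (alice_game_score : Int) : Decidable (Pre_calculate_initial_ranking scores alice_game_score) := by unfold Pre_calculate_initial_ranking; infer_instance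
def pvWitness_calculate_initial_ranking : List Int × Int := ([100, 90, 90, 80], 85)

def Spec_calculate_initial_ranking (scores : List Int) (alice_game_score : Int) (out : Int × Int) : Prop := out = calculate_initial_ranking_alt scores alice_game_score
instance (scores : List Int) (alice_game_score : Int) (out : Int × Int) : Decidable (Spec_calculate_initial_ranking scores alice_game_score out) := by unfold Spec_calculate_initial_ranking; infer_instance

-- ===== CLAIM (what is proved, stated in full; the proofs are below) =====
def Claim_equal_calculate_initial_ranking : Prop := ∀ (scores : List Int) (alice_game_score : Int), Dom_calculate_initial_ranking scores alice_game_score → Pre_calculate_initial_ranking scores alice_game_score → Spec_calculate_initial_ranking scores alice_game_score (calculate_initial_ranking scores alice_game_score)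
-- ===== LEMMAS AND PROOFS =====
-- number of runs of adjacent equal values: spec-level recursive characterization
def runsFrom (p : Int) : List Int → Int
  | [] => 0
  | a :: l => (if a = p then 0 else 1) + runsFrom a l

def runsL : List Int → Int
  | [] => 0
  | a :: l => 1 + runsFrom a l

theorem foldl_runs (l : List Int) : ∀ (r : Int) (p : Int),
    (l.foldl (fun (st : Int × Option Int) s =>
      (if st.2 = none ∨ st.2 ≠ some s then st.1 + 1 else st.1, some s)) (r, some p)).1
    = r + runsFrom p l := by
  induction l with
  | nil => intro r p; simp [runsFrom]
  | cons a l ih =>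
    intro r p
    by_cases h : a = p
    · simp [List.foldl, h, runsFrom, ih]
    · simp [List.foldl, h, Ne.symm h, runsFrom, ih]
      ring

theorem foldl_runs0 (l : List Int) :
    (l.foldl (fun (st : Int × Option Int) s =>
      (if st.2 = none ∨ st.2 ≠ some s then st.1 + 1 else st.1, some s)) (0, none)).1
    = runsL l := by
  cases l with
  | nil => simp [runsL]
  | cons a l => simp [List.foldl, runsL, foldl_runs]

theorem alt_eq (scores : List Int) (alice : Int) :
    calculate_initial_ranking_alt scores alice
      = (runsL (prefixGT alice scores) + 1, ((prefixGT alice scores).length : Int) - 1) := by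
  simp [calculate_initial_ranking_alt, foldl_runs0]

-- skipA stops at i + (length of the run of cs at the head of scores.drop i)
def leadCount (cs : Int) : List Int → Nat
  | [] => 0
  | a :: l => if a = cs then 1 + leadCount cs l else 0

theorem skipA_eq (scores : List Int) (cs : Int) : ∀ (i : Nat),
    skipA scores cs i = i + leadCount cs (scores.drop i) := by
  intro i
  fun_induction skipA scores cs i with
  | case1 i h heq ih =>
    rw [ih, List.drop_eq_getElem_cons h, leadCount, if_pos heq]
    omega
  | case2 i h heq =>
    rw [List.drop_eq_getElem_cons h, leadCount, if_neg heq]; omega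
  | case3 i h =>
    rw [List.drop_eq_nil_of_le (by omega), leadCount]
    omega

theorem leadCount_pos (cs : Int) (l : List Int) (h : l.head? = some cs) :
    1 ≤ leadCount cs l := by
  cases l with
  | nil => simp at h
  | cons a l =>
    simp at h
    simp [leadCount, h]

theorem leadCount_le (cs : Int) (l : List Int) : leadCount cs l ≤ l.length := by
  induction l with
  | nil => simp [leadCount]
  | cons a l ih =>
    simp only [leadCount]
    split
    · simp only [List.length_cons]; omega
    · simp

-- the element right after the lead run (if any) differs from the run value
theorem head_drop_leadCount (cs : Int) : ∀ (l : List Int), (l.drop (leadCount cs l)).head? ≠ some cs := by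
  intro l
  induction l with
  | nil => simp
  | cons a l ih =>
    by_cases h : a = cs
    · simpa [leadCount, h, Nat.add_comm 1 (leadCount cs l)] using ih
    · simp [leadCount, h]

theorem prefixGT_head (alice : Int) (l : List Int) (x : Int)
    (h : (prefixGT alice l).head? = some x) : l.head? = some x := by
  cases l with
  | nil => simp [prefixGT] at h
  | cons a l =>
    by_cases ha : a ≤ alice
    · simp [prefixGT, ha] at h
    · simp [prefixGT, ha] at h ⊢; omega

-- prefixGT over the lead run (whose value is > alice)
theorem run_split (alice cs : Int) (hgt : alice < cs) : ∀ (l : List Int), l.head? = some cs →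
    prefixGT alice l = List.replicate (leadCount cs l) cs ++ prefixGT alice (l.drop (leadCount cs l)) := by
  intro l
  induction l with
  | nil => simp
  | cons a l ih =>
    intro hh
    simp at hh
    subst hh
    simp only [leadCount, if_pos]
    rw [prefixGT, if_neg (by omega)]
    by_cases h : l.head? = some a
    · rw [ih h]
      simp [List.replicate_succ, Nat.add_comm 1 (leadCount a l)]
    · have hk : leadCount a l = 0 := by
        cases l with
        | nil => simp [leadCount]
        | cons b l =>
          simp at h
          simp [leadCount, h]
      simp [hk, List.replicate_succ]

theorem runsFrom_replicate (cs : Int) : ∀ (k : Nat) (X : List Int),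
    runsFrom cs (List.replicate k cs ++ X) = runsFrom cs X := by
  intro k
  induction k with
  | zero => simp
  | succ k ih => intro X; simp [List.replicate_succ, runsFrom, ih]

theorem runsFrom_eq_runsL (cs : Int) (X : List Int) (h : X.head? ≠ some cs) :
    runsFrom cs X = runsL X := by
  cases X with
  | nil => simp [runsFrom, runsL]
  | cons x X =>
    simp at h
    simp [runsFrom, runsL, h]

theorem runsL_replicate_append (cs : Int) (k : Nat) (hk : 1 ≤ k) (X : List Int)
    (h : X.head? ≠ some cs) :
    runsL (List.replicate k cs ++ X) = 1 + runsL X := by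
  match k, hk with
  | k + 1, _ =>
    rw [List.replicate_succ, List.cons_append, runsL, runsFrom_replicate, runsFrom_eq_runsL cs X h]

-- main loop invariant
theorem loopA_eq (scores : List Int) (alice : Int) : ∀ (fuel i : Nat) (rank : Int)
    (hi : i < scores.length), scores.length - i < fuel →
    loopA scores alice rank scores[i] i fuel
      = (rank + runsL (prefixGT alice (scores.drop i)),
         (i : Int) + ((prefixGT alice (scores.drop i)).length : Int) - 1) := by
  intro fuel
  induction fuel with
  | zero => omega
  | succ f ih =>
    intro i rank hi hf
    have hd : scores.drop i = scores[i] :: scores.drop (i + 1) := List.drop_eq_getElem_cons hi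
    rw [loopA, if_pos hi]
    by_cases hle : scores[i] ≤ alice
    · rw [if_pos hle, hd, prefixGT, if_pos hle]
      simp [runsL]
    · rw [if_neg hle]
      have hgt : alice < scores[i] := by omega
      have hh : (scores.drop i).head? = some scores[i] := by rw [hd]; rfl
      have hk1 : 1 ≤ leadCount scores[i] (scores.drop i) := leadCount_pos _ _ hh
      have hsk : skipA scores scores[i] i = i + leadCount scores[i] (scores.drop i) :=
        skipA_eq scores scores[i] i
      have hkle : leadCount scores[i] (scores.drop i) ≤ (scores.drop i).length :=
        leadCount_le _ _
      have hdj : scores.drop (skipA scores scores[i] i)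
          = (scores.drop i).drop (leadCount scores[i] (scores.drop i)) := by
        rw [hsk, ← List.drop_drop]
      have hsplit := run_split alice scores[i] hgt (scores.drop i) hh
      have hhead : (prefixGT alice ((scores.drop i).drop (leadCount scores[i] (scores.drop i)))).head? ≠ some scores[i] := by
        intro hc
        exact head_drop_leadCount scores[i] (scores.drop i) (prefixGT_head _ _ _ hc)
      have hruns : runsL (prefixGT alice (scores.drop i))
          = 1 + runsL (prefixGT alice ((scores.drop i).drop (leadCount scores[i] (scores.drop i)))) := by
        rw [hsplit]
        exact runsL_replicate_append _ _ hk1 _ hhead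
      have hlen : (prefixGT alice (scores.drop i)).length
          = leadCount scores[i] (scores.drop i)
            + (prefixGT alice ((scores.drop i).drop (leadCount scores[i] (scores.drop i)))).length := by
        rw [hsplit]; simp
      simp only [List.length_drop] at hkle
      split
      · next h =>
        have := ih (skipA scores scores[i] i) (rank + 1) h (by omega)
        rw [this, hdj, hsk]
        rw [hruns, hlen, Prod.mk.injEq]
        refine ⟨by ring, by push_cast; ring⟩
      · next h =>
        have hje : (scores.drop i).drop (leadCount scores[i] (scores.drop i)) = [] := by
          apply List.drop_eq_nil_of_le
          simp only [List.length_drop]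
          omega
        rw [hruns, hlen, hje]
        simp only [prefixGT, runsL, List.length_nil, Prod.mk.injEq]
        refine ⟨by ring, by rw [hsk]; push_cast; omega⟩

-- ===== VERDICT (by name: the statement is the Claim_ definition above) =====
theorem calculate_initial_ranking_spec : Claim_equal_calculate_initial_ranking := by
  intro scores alice _ hpre
  unfold Spec_calculate_initial_ranking
  match scores, hpre with
  | s0 :: rest, _ =>
    show loopA (s0 :: rest) alice 1 s0 0 ((s0 :: rest).length + 1) = _
    have h0 : (s0 :: rest)[0] = s0 := rfl
    have := loopA_eq (s0 :: rest) alice ((s0 :: rest).length + 1) 0 1 (by simp) (by omega)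
    rw [h0] at this
    rw [this, alt_eq]
    simp
    ring
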